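-- pv_equiv track=rewrite | github.com/yeomkyeorae/algorithm | study/Programmers/2020_Kakao_string_compressing.py | solution
-- ===== SOURCE A (Python) =====
-- def solution(s):
--     min_value = len(s)
--     for unit in range(1, len(s) - 1):
--         compressed = ''
--         for ix in range(0, len(s), unit):
--             if ix == 0:
--                 tmp_string = s[ix:ix + unit]
--                 cnt = 1
--                 continue
--
--             if s[ix:ix + unit] == tmp_string:
--                 cnt += 1
--             else:
--                 if cnt > 1:
--                     compressed += str(cnt) + tmp_string
--                 else:
--                     compressed += tmp_string
--                 tmp_string = s[ix:ix + unit]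
--                 cnt = 1
--         if cnt > 1:
--             compressed += str(cnt) + tmp_string
--         else:
--             compressed += tmp_string
--         if len(compressed) < min_value:
--             min_value = len(compressed)
--
--     return min_value
-- ===== SOURCE B (Python) =====
-- def solution(s):
--     n = len(s)
--     best = n
--     for unit in range(1, n - 1):
--         # run-head positions: chunk starts whose chunk differs from the previous chunk
--         bounds = [b for b in range(0, n, unit)
--                   if b == 0 or s[b:b + unit] != s[b - unit:b]]
--         ends = bounds[1:] + [n]
--         total = 0
--         for b, e in zip(bounds, ends):
--             cnt = (e - b + unit - 1) // unit  # chunks in this run, by index arithmetic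
--             total += len(s[b:b + unit]) + (len(str(cnt)) if cnt > 1 else 0)
--         if total < best:
--             best = total
--     return best
-- ===== Notes on version B (the rewrite author's own statement) =====
-- stated objective: alternative
-- what changed: B replaces A's streaming run-length state machine (which concatenates the compressed string chunk by chunk and measures it) with index arithmetic: for each unit it computes the list of run-boundary positions by a filter comparing adjacent slices in place, pairs each boundary with the next one (or n), and derives each run's count by ceiling division of the position gap, summing lengths without ever materializing runs or the compressed string.
import Mathlib
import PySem

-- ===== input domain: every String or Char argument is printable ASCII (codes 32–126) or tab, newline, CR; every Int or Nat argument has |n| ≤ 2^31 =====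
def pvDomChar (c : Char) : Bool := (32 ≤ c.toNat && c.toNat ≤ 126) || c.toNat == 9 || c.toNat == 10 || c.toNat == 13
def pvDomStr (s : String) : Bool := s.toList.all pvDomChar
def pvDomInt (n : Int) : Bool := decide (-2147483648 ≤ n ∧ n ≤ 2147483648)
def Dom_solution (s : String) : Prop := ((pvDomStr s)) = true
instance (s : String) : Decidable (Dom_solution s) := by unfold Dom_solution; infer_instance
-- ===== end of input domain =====

-- B replaces A's streaming RLE state machine that builds the compressed string with
-- boundary-position index arithmetic: filter run-head positions, pair each with the next
-- boundary (or n), derive counts by ceiling division of the gaps (alternative, same cost).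

-- ===== PORT A =====
-- inner-loop body of A: state (compressed, tmp_string, cnt); the `ix == 0` branch resets
-- tmp_string/cnt and `continue`s, leaving compressed unchanged
def solutionStep (cs : List Char) (unit : Int)
    (st : List Char × List Char × Int) (ix : Int) : List Char × List Char × Int :=
  if ix = 0 then (st.1, PySem.List.slice cs (some ix) (some (ix + unit)), 1)
  else if PySem.List.slice cs (some ix) (some (ix + unit)) = st.2.1 then
    (st.1, st.2.1, st.2.2 + 1)
  else
    ((if st.2.2 > 1 then st.1 ++ PySem.Int.toChars st.2.2 ++ st.2.1 else st.1 ++ st.2.1),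
     PySem.List.slice cs (some ix) (some (ix + unit)), 1)

def solution (s : String) : Int :=
  let cs := s.toList
  let n : Int := PySem.Str.len s
  -- In Python tmp_string/cnt are leftovers of the previous unit, always overwritten at ix = 0
  -- before first use (the inner range is nonempty whenever the outer loop runs); dummy-initialized here.
  (PySem.List.pyRange 1 (n - 1) 1).foldl (fun min_value unit =>
    let r := (PySem.List.pyRange 0 n unit).foldl (solutionStep cs unit) ([], [], 1)
    let clen : Int :=
      ((if r.2.2 > 1 then r.1 ++ PySem.Int.toChars r.2.2 ++ r.2.1 else r.1 ++ r.2.1).length : Int)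
    if clen < min_value then clen else min_value) n

-- ===== PORT B =====
def solution_alt (s : String) : Int :=
  let cs := s.toList
  let n : Int := PySem.Str.len s
  (PySem.List.pyRange 1 (n - 1) 1).foldl (fun best unit =>
    -- run-head positions: chunk starts whose chunk differs from the previous chunk
    let bounds := (PySem.List.pyRange 0 n unit).filter (fun b =>
      b == 0 || !(PySem.List.slice cs (some b) (some (b + unit)) ==
                  PySem.List.slice cs (some (b - unit)) (some b)))
    let ends := bounds.drop 1 ++ [n]
    let total := (bounds.zip ends).foldl (fun acc be =>
      let cnt := PySem.Int.floordiv (be.2 - be.1 + unit - 1) unit  -- chunks in this run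
      acc + ((PySem.List.slice cs (some be.1) (some (be.1 + unit))).length : Int) +
        (if cnt > 1 then ((PySem.Int.toChars cnt).length : Int) else 0)) 0
    if total < best then total else best) n

-- ===== PRECONDITION & SPEC =====
def Spec_solution (s : String) (out : Int) : Prop := out = solution_alt s
instance (s : String) (out : Int) : Decidable (Spec_solution s out) := by unfold Spec_solution; infer_instance

-- ===== CLAIM (what is proved, stated in full; the proofs are below) =====
def Claim_equal_solution : Prop := ∀ (s : String), Dom_solution s → Spec_solution s (solution s)

-- ===== LEMMAS AND PROOFS =====

-- the chunk of width u starting at position b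
def chunkA (cs : List Char) (u b : Int) : List Char :=
  PySem.List.slice cs (some b) (some (b + u))

-- length contribution of one run (digits of the count when > 1, plus the chunk length)
def contribC (t : List Char) (cnt : Int) : Int :=
  (if cnt > 1 then ((PySem.Int.toChars cnt).length : Int) else 0) + (t.length : Int)

-- compressed length of a chunk list, given a pending run (t, cnt)
def rlenC (t : List Char) (cnt : Int) : List (List Char) → Int
  | [] => contribC t cnt
  | c :: L => if c = t then rlenC t (cnt + 1) L else contribC t cnt + rlenC c 1 L

def emitC (acc t : List Char) (cnt : Int) : List Char :=
  if cnt > 1 then acc ++ PySem.Int.toChars cnt ++ t else acc ++ t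

-- A's inner-loop body at a non-zero index, expressed on the chunk itself
def stepC (st : List Char × List Char × Int) (c : List Char) : List Char × List Char × Int :=
  if c = st.2.1 then (st.1, st.2.1, st.2.2 + 1) else (emitC st.1 st.2.1 st.2.2, c, 1)

def finC (st : List Char × List Char × Int) : Int :=
  ((emitC st.1 st.2.1 st.2.2).length : Int)

lemma stepA_eq (cs : List Char) (unit : Int) (st : List Char × List Char × Int)
    (ix : Int) (hix : ¬ ix = 0) :
    solutionStep cs unit st ix = stepC st (PySem.List.slice cs (some ix) (some (ix + unit))) := by
  simp only [solutionStep, stepC, emitC, if_neg hix]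

lemma emit_len (acc t : List Char) (cnt : Int) :
    ((emitC acc t cnt).length : Int) = (acc.length : Int) + contribC t cnt := by
  unfold emitC contribC
  split_ifs <;> simp [List.length_append]

lemma A_inv (L : List (List Char)) : ∀ (acc t : List Char) (cnt : Int),
    finC (L.foldl stepC (acc, t, cnt)) = (acc.length : Int) + rlenC t cnt L := by
  induction L with
  | nil =>
    intro acc t cnt
    simp only [List.foldl_nil, rlenC, finC]
    exact emit_len acc t cnt
  | cons c L ih =>
    intro acc t cnt
    simp only [List.foldl_cons, stepC]
    by_cases h : c = t
    · simp only [if_pos h, rlenC, ih]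
    · simp only [if_neg h, rlenC, ih, emit_len]
      ring

-- B's per-boundary contribution: head-chunk length plus digits of the run count
def bcontrib (cs : List Char) (u b e : Int) : Int :=
  ((chunkA cs u b).length : Int) +
    (if PySem.Int.floordiv (e - b + u - 1) u > 1 then
      ((PySem.Int.toChars (PySem.Int.floordiv (e - b + u - 1) u)).length : Int) else 0)

-- B's total over a pending boundary b and the remaining boundary list
def Tpend (cs : List Char) (u n : Int) : Int → List Int → Int
  | b, [] => bcontrib cs u b n
  | b, b' :: rest => bcontrib cs u b b' + Tpend cs u n b' rest

lemma zip_fold_eq (cs : List Char) (u n : Int) (bs : List Int) : ∀ (b init : Int),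
    (((b :: bs).zip (bs ++ [n])).foldl (fun acc (be : Int × Int) =>
      acc + ((PySem.List.slice cs (some be.1) (some (be.1 + u))).length : Int) +
        (if PySem.Int.floordiv (be.2 - be.1 + u - 1) u > 1 then
          ((PySem.Int.toChars (PySem.Int.floordiv (be.2 - be.1 + u - 1) u)).length : Int) else 0))
      init)
    = init + Tpend cs u n b bs := by
  induction bs with
  | nil => intro b init; simp [Tpend, bcontrib, chunkA]; ring
  | cons b' rest ih =>
    intro b init
    simp only [List.cons_append, List.zip_cons_cons, List.foldl_cons, Tpend, ih, bcontrib, chunkA]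
    ring

lemma fdiv_exact (u c a : Int) (hu : 0 < u) (h1 : u * (c - 1) < a) (h2 : a ≤ u * c) :
    PySem.Int.floordiv (a + u - 1) u = c := by
  rw [PySem.Int.floordiv_eq_iff_of_pos hu]
  constructor <;> nlinarith

lemma main_runs (cs : List Char) (u n : Int) (hu : 0 < u) :
    ∀ (q : Nat) (b cnt : Int) (t : List Char),
      1 ≤ cnt → t = chunkA cs u b → t = chunkA cs u (b + u * (cnt - 1)) →
      b + u * cnt + u * ((q : Int) - 1) < n →
      n ≤ b + u * cnt + u * (q : Int) →
      Tpend cs u n b (((List.range q).map (fun j : Nat => b + u * cnt + u * (j : Int))).filter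
          (fun p => !(chunkA cs u p == chunkA cs u (p - u))))
        = rlenC t cnt (((List.range q).map (fun j : Nat => b + u * cnt + u * (j : Int))).map (chunkA cs u)) := by
  intro q
  induction q with
  | zero =>
    intro b cnt t h1 h2 h3 h4 h5
    push_cast at h4 h5
    simp only [List.range_zero, List.map_nil, List.filter_nil, Tpend, rlenC]
    have e1 : u * (cnt - 1) = u * cnt + u * (0 - 1) := by ring
    have hlt : u * (cnt - 1) < n - b := by rw [e1]; linarith
    have hle : n - b ≤ u * cnt := by linarith
    have hc : PySem.Int.floordiv (n - b + u - 1) u = cnt := fdiv_exact u cnt (n - b) hu hlt hle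
    unfold bcontrib contribC
    rw [hc, ← h2]
    ring
  | succ q ih =>
    intro b cnt t h1 h2 h3 h4 h5
    push_cast at h4 h5
    rw [List.range_succ_eq_map]
    simp only [List.map_cons, Nat.cast_zero, mul_zero, add_zero, List.filter_cons]
    have hprev : chunkA cs u (b + u * cnt - u) = t := by
      rw [show b + u * cnt - u = b + u * (cnt - 1) by ring]; exact h3.symm
    by_cases hc : chunkA cs u (b + u * cnt) = t
    · have hbeq : (!(chunkA cs u (b + u * cnt) == chunkA cs u (b + u * cnt - u))) = false := by
        simp [hc, hprev]
      rw [hbeq]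
      simp only [Bool.false_eq_true, if_false, rlenC, if_pos hc]
      have hfun : ((List.range q).map Nat.succ).map (fun j : Nat => b + u * cnt + u * (j : Int))
          = ((List.range q).map (fun j : Nat => b + u * (cnt + 1) + u * (j : Int))) := by
        rw [List.map_map]
        apply List.map_congr_left; intro j _; simp [Function.comp]; ring
      rw [hfun]
      apply ih b (cnt + 1) t (by linarith)
      · exact h2
      · rw [show b + u * ((cnt + 1) - 1) = b + u * cnt by ring]; exact hc.symm
      · rw [show b + u * (cnt + 1) + u * ((q : Int) - 1) = b + u * cnt + u * ((q : Int) + 1 - 1) by ring]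
        exact h4
      · rw [show b + u * (cnt + 1) + u * (q : Int) = b + u * cnt + u * ((q : Int) + 1) by ring]
        exact h5
    · have hbeq : (!(chunkA cs u (b + u * cnt) == chunkA cs u (b + u * cnt - u))) = true := by
        simp [hprev, hc]
      rw [hbeq]
      simp only [if_true, Tpend, rlenC, if_neg hc]
      have hcnt : PySem.Int.floordiv (b + u * cnt - b + u - 1) u = cnt := by
        apply fdiv_exact u cnt _ hu
        · have : u * (cnt - 1) = u * cnt - u := by ring
          rw [this]; omega
        · omega
      have hhead : bcontrib cs u b (b + u * cnt) = contribC t cnt := by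
        unfold bcontrib contribC
        rw [hcnt, ← h2]
        ring
      rw [hhead]
      have hfun : ((List.range q).map Nat.succ).map (fun j : Nat => b + u * cnt + u * (j : Int))
          = ((List.range q).map (fun j : Nat => (b + u * cnt) + u * 1 + u * (j : Int))) := by
        rw [List.map_map]
        apply List.map_congr_left; intro j _; simp [Function.comp]; ring
      rw [hfun]
      have := ih (b + u * cnt) 1 (chunkA cs u (b + u * cnt)) le_rfl rfl
        (by rw [show b + u * cnt + u * ((1:Int) - 1) = b + u * cnt by ring])
        (by rw [show b + u * cnt + u * 1 + u * ((q : Int) - 1) = b + u * cnt + u * ((q : Int) + 1 - 1) by ring]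
            exact h4)
        (by rw [show b + u * cnt + u * 1 + u * (q : Int) = b + u * cnt + u * ((q : Int) + 1) by ring]
            exact h5)
      rw [this]

-- per-unit equality: A's measured compressed length = B's boundary-arithmetic total
lemma inner_eq (cs : List Char) (unit n : Int) (h1 : 1 ≤ unit) (hn : 0 < n) :
    (((if ((PySem.List.pyRange 0 n unit).foldl (solutionStep cs unit) ([], [], 1)).2.2 > 1 then
        ((PySem.List.pyRange 0 n unit).foldl (solutionStep cs unit) ([], [], 1)).1 ++
          PySem.Int.toChars
            ((PySem.List.pyRange 0 n unit).foldl (solutionStep cs unit) ([], [], 1)).2.2 ++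
          ((PySem.List.pyRange 0 n unit).foldl (solutionStep cs unit) ([], [], 1)).2.1
      else
        ((PySem.List.pyRange 0 n unit).foldl (solutionStep cs unit) ([], [], 1)).1 ++
          ((PySem.List.pyRange 0 n unit).foldl (solutionStep cs unit) ([], [], 1)).2.1).length : Nat) : Int)
    = (List.zip
        ((PySem.List.pyRange 0 n unit).filter (fun b =>
          b == 0 || !(PySem.List.slice cs (some b) (some (b + unit)) ==
                      PySem.List.slice cs (some (b - unit)) (some b))))
        (((PySem.List.pyRange 0 n unit).filter (fun b =>
          b == 0 || !(PySem.List.slice cs (some b) (some (b + unit)) ==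
                      PySem.List.slice cs (some (b - unit)) (some b)))).drop 1 ++ [n])).foldl
        (fun acc (be : Int × Int) =>
          acc + ((PySem.List.slice cs (some be.1) (some (be.1 + unit))).length : Int) +
            (if PySem.Int.floordiv (be.2 - be.1 + unit - 1) unit > 1 then
              ((PySem.Int.toChars (PySem.Int.floordiv (be.2 - be.1 + unit - 1) unit)).length : Int)
             else 0)) 0 := by
  have hu : (0 : Int) < unit := lt_of_lt_of_le zero_lt_one h1
  rw [PySem.List.pyRange_of_pos 0 n hu]
  simp only [if_pos hn]
  have hM : 0 < ((n - 0 + unit - 1) / unit).toNat := by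
    have h2 : (1 : Int) ≤ (n - 0 + unit - 1) / unit := by
      rw [Int.le_ediv_iff_mul_le hu]; omega
    omega
  obtain ⟨M', hM'⟩ : ∃ M', ((n - 0 + unit - 1) / unit).toNat = M' + 1 :=
    ⟨((n - 0 + unit - 1) / unit).toNat - 1, by omega⟩
  rw [hM', List.range_succ_eq_map]
  simp only [List.map_cons, Nat.cast_zero, mul_zero, add_zero, List.foldl_cons, List.filter_cons]
  have hL : List.map (fun k : Nat => 0 + unit * (k : Int)) (List.map Nat.succ (List.range M'))
      = (List.range M').map (fun j : Nat => 0 + unit * 1 + unit * (j : Int)) := by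
    rw [List.map_map]
    apply List.map_congr_left; intro j _; simp [Function.comp]; ring
  rw [hL]
  simp only [beq_self_eq_true, Bool.true_or]
  simp only [if_true]
  have hpos : ∀ j : Nat, (0 : Int) < 0 + unit * 1 + unit * (j : Int) := by
    intro j
    have : 0 ≤ unit * (j : Int) := mul_nonneg (le_of_lt hu) (by positivity)
    omega
  have hfil : List.filter (fun b =>
        b == 0 || !(PySem.List.slice cs (some b) (some (b + unit)) ==
                    PySem.List.slice cs (some (b - unit)) (some b)))
        ((List.range M').map (fun j : Nat => 0 + unit * 1 + unit * (j : Int)))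
      = List.filter (fun p => !(chunkA cs unit p == chunkA cs unit (p - unit)))
        ((List.range M').map (fun j : Nat => 0 + unit * 1 + unit * (j : Int))) := by
    apply List.filter_congr
    intro x hx
    obtain ⟨j, hj, rfl⟩ := List.mem_map.1 hx
    have hne : ¬ (0 + unit * 1 + unit * (j : Int) = 0) := by
      have := hpos j; omega
    have hb0 : ((0 + unit * 1 + unit * (j : Int)) == (0 : Int)) = false := by
      simp only [beq_eq_false_iff_ne, ne_eq]; exact hne
    simp only [chunkA, hb0, Bool.false_or]
    rw [show 0 + unit * 1 + unit * (j : Int) - unit + unit = 0 + unit * 1 + unit * (j : Int)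
      from by ring]
  rw [hfil, List.drop_succ_cons, List.drop_zero, zip_fold_eq]
  -- arithmetic facts about the chunk count M' + 1 = ceil(n / unit)
  have h0 : 0 ≤ (n - 0 + unit - 1) / unit := Int.ediv_nonneg (by omega) (le_of_lt hu)
  have hd : (n - 0 + unit - 1) / unit = (M' : Int) + 1 := by
    rw [← Int.toNat_of_nonneg h0, hM']; push_cast
    ring
  have hdm := Int.mul_ediv_add_emod (n - 0 + unit - 1) unit
  rw [hd] at hdm
  have hr0 : 0 ≤ (n - 0 + unit - 1) % unit := Int.emod_nonneg _ (ne_of_gt hu)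
  have hr1 : (n - 0 + unit - 1) % unit < unit := Int.emod_lt_of_pos _ hu
  have hb1 : (0 : Int) + unit * 1 + unit * ((M' : Int) - 1) < n := by
    have e : (0 : Int) + unit * 1 + unit * ((M' : Int) - 1) = unit * ((M' : Int) + 1) - unit := by
      ring
    rw [e]; linarith
  have hb2 : n ≤ (0 : Int) + unit * 1 + unit * (M' : Int) := by
    have e : (0 : Int) + unit * 1 + unit * (M' : Int) = unit * ((M' : Int) + 1) := by ring
    rw [e]; linarith
  rw [main_runs cs unit n hu M' 0 1 (chunkA cs unit 0) le_rfl rfl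
    (by rw [show (0 : Int) + unit * (1 - 1) = 0 by ring]) hb1 hb2]
  -- A side: the first chunk seeds the state, the rest fold stepC over the chunks
  have hA0 : solutionStep cs unit ([], [], 1) 0
      = (([] : List Char), chunkA cs unit 0, 1) := by
    simp [solutionStep, chunkA]
  rw [hA0]
  have hcongr : ∀ (st : List Char × List Char × Int),
      ∀ x ∈ (List.range M').map (fun j : Nat => 0 + unit * 1 + unit * (j : Int)),
      solutionStep cs unit st x = stepC st (chunkA cs unit x) := by
    intro st x hx
    obtain ⟨j, hj, rfl⟩ := List.mem_map.1 hx
    have hne : ¬ (0 + unit * 1 + unit * (j : Int) = 0) := by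
      have := hpos j; omega
    rw [stepA_eq cs unit st _ hne]; rfl
  rw [PySem.List.foldl_congr_mem _ _ _ _ hcongr, ← List.foldl_map]
  show finC ((((List.range M').map (fun j : Nat => 0 + unit * 1 + unit * (j : Int))).map
      (chunkA cs unit)).foldl stepC (([] : List Char), chunkA cs unit 0, 1)) = _
  rw [A_inv]
  simp

-- ===== VERDICT (by name: the statement is the Claim_ definition above) =====
theorem solution_spec : Claim_equal_solution := by
  intro s _
  unfold Spec_solution solution solution_alt
  apply PySem.List.foldl_congr_mem
  intro acc unit hmem
  rw [PySem.List.mem_pyRange_one] at hmem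
  have h1 : 1 ≤ unit := hmem.1
  have hn : 0 < PySem.Str.len s := by
    have := hmem.2
    omega
  simp only [inner_eq s.toList unit (PySem.Str.len s) h1 hn]
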